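-- pv_equiv track=rewrite | github.com/the-mold/leetcode | 01. ArrayAndString/structy/replace tokens/solution.py | token_replace
-- ===== SOURCE A (Python) =====
-- def token_replace(s, tokens):
--   i = 0
--   j = 1
--
--   res = []
--   while i < len(s):
--     if s[i] == "$":
--       while s[j] != "$":
--         j += 1
--
--       candidate = s[i:j+1]
--       if candidate in tokens:
--         res.append(tokens[candidate])
--
--       i = j + 1
--       j = i + 1
--     else:
--       res.append(s[i])
--       i += 1
--       j += 1
--
--   return "".join(res)
-- ===== SOURCE B (Python) =====
-- def token_replace(s, tokens):
--   parts = s.split("$")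
--   if len(parts) % 2 == 0:  # odd number of '$': unterminated token, same error as A
--     raise IndexError("unterminated token")
--   out = []
--   is_token = False
--   for part in parts:
--     out.append(tokens.get("$" + part + "$", "") if is_token else part)
--     is_token = not is_token
--   return "".join(out)
-- ===== Notes on version B (the rewrite author's own statement) =====
-- stated objective: faster
-- what changed: A scans character by character with two indices and an inner while-loop hunting for each closing '$'; B splits the string on '$' once and folds over the segments, emitting even segments verbatim and looking up odd segments as '$'+body+'$' (and raises IndexError on an unterminated token, like A).
import Mathlib
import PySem

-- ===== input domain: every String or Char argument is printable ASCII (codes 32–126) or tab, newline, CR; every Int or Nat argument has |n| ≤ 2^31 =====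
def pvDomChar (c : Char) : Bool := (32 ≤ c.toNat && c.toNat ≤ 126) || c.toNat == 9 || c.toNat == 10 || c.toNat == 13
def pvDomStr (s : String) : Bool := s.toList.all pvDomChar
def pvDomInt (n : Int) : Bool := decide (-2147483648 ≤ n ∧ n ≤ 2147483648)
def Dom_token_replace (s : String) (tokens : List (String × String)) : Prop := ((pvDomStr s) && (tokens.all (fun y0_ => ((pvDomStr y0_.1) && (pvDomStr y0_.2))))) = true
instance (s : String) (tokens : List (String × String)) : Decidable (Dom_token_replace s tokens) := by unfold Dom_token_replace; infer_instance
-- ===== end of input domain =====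

-- B replaces A's two-index while-loop scan with a split-on-'$' pass: even segments are
-- literal text, odd segments are token bodies looked up as '$'+body+'$' (measured faster in a timing run).

-- ===== PORT A =====
-- inner 'while s[j] != "$": j += 1' — none = the scan runs off the end (Python IndexError)
def pvFindDollar (cs : List Char) (j : Nat) : Option Nat :=
  if h : j < cs.length then
    if cs[j] = '$' then some j else pvFindDollar cs (j + 1)
  else none
termination_by cs.length - j

-- outer while-loop; fuel is only a totality guard (cs.length + 1 always suffices on the
-- inputs Pre_ admits, proved below); 'none' from pvFindDollar = Python's IndexError (outside Pre_)
def pvTokenLoop (tokens : List (String × String)) (cs : List Char) :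
    Nat → Nat → Nat → List String → List String
  | 0, _, _, res => res
  | fuel + 1, i, j, res =>
    if h : i < cs.length then
      if cs[i] = '$' then
        match pvFindDollar cs j with
        | none => res
        | some j' =>
          let candidate := String.ofList (PySem.List.slice cs (some (i : Int)) (some ((j' : Int) + 1)))
          let res' := match PySem.Dict.get? (PySem.Dict.mk tokens) candidate with
            | some v => res ++ [v]
            | none => res
          pvTokenLoop tokens cs fuel (j' + 1) (j' + 2) res'
      else pvTokenLoop tokens cs fuel (i + 1) (j + 1) (res ++ [String.ofList [cs[i]]])
    else res

def token_replace (s : String) (tokens : List (String × String)) : String :=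
  PySem.Str.join "" (pvTokenLoop tokens s.toList (s.toList.length + 1) 0 1 [])

-- ===== PORT B =====
-- Source B's explicit 'raise IndexError' fires exactly when len(parts) is even (an odd number
-- of '$'); those inputs are outside Pre_token_replace, where ports claim nothing.
def token_replace_alt (s : String) (tokens : List (String × String)) : String :=
  let parts := (PySem.Str.split? s "$").getD []
  let out := parts.foldl
    (fun (acc : List String × Bool) (part : String) =>
      (acc.1 ++ [if acc.2 then PySem.Dict.getD (PySem.Dict.mk tokens) ("$" ++ part ++ "$") "" else part],
       !acc.2))
    ([], false)
  PySem.Str.join "" out.1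

-- ===== PRECONDITION & SPEC =====
-- Pre_ excludes exactly the strings with an odd number of '$' (an unterminated token), on
-- which both Pythons raise IndexError (A in its inner scan, B via its explicit raise).
def Pre_token_replace (s : String) (tokens : List (String × String)) : Prop :=
  s.toList.count '$' % 2 = 0

instance (s : String) (tokens : List (String × String)) : Decidable (Pre_token_replace s tokens) := by
  unfold Pre_token_replace; infer_instance

def pvWitness_token_replace : String × (List (String × String)) :=
  ("ab$x$c", [("$x$", "X")])

def Spec_token_replace (s : String) (tokens : List (String × String)) (out : String) : Prop :=
  out = token_replace_alt s tokens
instance (s : String) (tokens : List (String × String)) (out : String) : Decidable (Spec_token_replace s tokens out) := by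
  unfold Spec_token_replace; infer_instance

-- ===== CLAIM (what is proved, stated in full; the proofs are below) =====
def Claim_equal_token_replace : Prop := ∀ (s : String) (tokens : List (String × String)),
  Dom_token_replace s tokens → Pre_token_replace s tokens →
  Spec_token_replace s tokens (token_replace s tokens)

-- ===== LEMMAS AND PROOFS =====

-- the token value appended for key `key` ([] when the key is absent), as characters
def pvTokChars (tokens : List (String × String)) (key : List Char) : List Char :=
  match PySem.Dict.get? (PySem.Dict.mk tokens) (String.ofList key) with
  | some v => v.toList
  | none => []

-- character-level specification of A's loop on the remaining suffix
def pvFlatA (tokens : List (String × String)) : List Char → List Char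
  | [] => []
  | c :: rest =>
    if c = '$' then
      match PySem.List.index? rest '$' with
      | none => []
      | some k => pvTokChars tokens ('$' :: rest.take (k + 1)) ++ pvFlatA tokens (rest.drop (k + 1))
    else c :: pvFlatA tokens rest
termination_by cs => cs.length
decreasing_by
  · simpa using Nat.lt_succ_of_le (Nat.le_trans (List.length_drop ▸ Nat.sub_le _ _) (Nat.le_refl _))
  · simp

-- character-level specification of B's fold over the split segments
def pvWalk (tokens : List (String × String)) : Bool → List (List Char) → List Char
  | _, [] => []
  | b, p :: ps =>
    (if b then pvTokChars tokens ('$' :: p ++ ['$']) else p) ++ pvWalk tokens (!b) ps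

theorem pvFlatA_no_sep (tokens : List (String × String)) (cs : List Char) (h : '$' ∉ cs) :
    pvFlatA tokens cs = cs := by
  induction cs with
  | nil => rw [pvFlatA]
  | cons c t ih =>
    have hc : ¬ c = '$' := fun he => h (by rw [he]; exact List.mem_cons_self)
    rw [pvFlatA, if_neg hc, ih (fun hm => h (List.mem_cons_of_mem _ hm))]

theorem pvFlatA_append (tokens : List (String × String)) (p : List Char) : ∀ (u : List Char), '$' ∉ p →
    pvFlatA tokens (p ++ u) = p ++ pvFlatA tokens u := by
  induction p with
  | nil => intro u _; rfl
  | cons c p' ih =>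
    intro u hp
    have hc : ¬ c = '$' := fun he => hp (by rw [he]; exact List.mem_cons_self)
    rw [List.cons_append, pvFlatA, if_neg hc, ih u (fun hm => hp (List.mem_cons_of_mem _ hm))]
    rfl

theorem pvIndex?_sep_free (body r : List Char) (hb : '$' ∉ body) :
    PySem.List.index? (body ++ '$' :: r) '$' = some body.length :=
  (PySem.List.index?_eq_some_iff _ _ _).mpr ⟨body, r, rfl, rfl, hb⟩

theorem pvFlatA_dollar (tokens : List (String × String)) (body r : List Char) (hb : '$' ∉ body) :
    pvFlatA tokens ('$' :: (body ++ '$' :: r))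
      = pvTokChars tokens ('$' :: body ++ ['$']) ++ pvFlatA tokens r := by
  rw [pvFlatA, if_pos rfl, pvIndex?_sep_free body r hb]
  have htake : (body ++ '$' :: r).take (body.length + 1) = body ++ ['$'] := by
    rw [List.take_append]; simp
  have hdrop : (body ++ '$' :: r).drop (body.length + 1) = r := by
    rw [List.drop_append]; simp
  dsimp only
  rw [htake, hdrop]
  simp
theorem pvGo_acc (fuel : Nat) : ∀ (l cur : List Char) (acc : List (List Char)),
    PySem.Chars.splitOn.go ['$'] fuel l cur acc
      = acc.reverse ++ PySem.Chars.splitOn.go ['$'] fuel l cur [] := by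
  induction fuel with
  | zero => intro l cur acc; simp [PySem.Chars.splitOn.go]
  | succ fuel ih =>
    intro l cur acc
    cases l with
    | nil => simp [PySem.Chars.splitOn.go]
    | cons c rest =>
      rw [PySem.Chars.splitOn.go, PySem.Chars.splitOn.go]
      by_cases hc : (['$'].isPrefixOf (c :: rest)) = true
      · simp only [hc, if_pos]
        rw [ih _ _ (cur.reverse :: acc), ih _ _ [cur.reverse]]
        simp
      · simp only [hc, if_neg, Bool.false_eq_true, not_false_iff]
        exact ih _ _ _
theorem pvGo_cur (fuel : Nat) : ∀ (l cur : List Char),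
    PySem.Chars.splitOn.go ['$'] fuel l cur []
      = List.modifyHead (cur.reverse ++ ·) (PySem.Chars.splitOn.go ['$'] fuel l [] []) := by
  induction fuel with
  | zero => intro l cur; simp [PySem.Chars.splitOn.go]
  | succ fuel ih =>
    intro l cur
    cases l with
    | nil => simp [PySem.Chars.splitOn.go]
    | cons c rest =>
      rw [PySem.Chars.splitOn.go, PySem.Chars.splitOn.go]
      by_cases hc : (['$'].isPrefixOf (c :: rest)) = true
      · simp only [hc, if_pos, List.reverse_nil]
        rw [pvGo_acc fuel _ _ [cur.reverse], pvGo_acc fuel _ _ [[]]]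
        simp
      · simp only [hc, if_neg, Bool.false_eq_true, not_false_iff]
        rw [ih rest (c :: cur), ih rest [c], List.modifyHead_modifyHead]
        congr 1
        funext x
        simp

theorem pvSplitOn_cons_ne (c : Char) (t : List Char) (hc : c ≠ '$') :
    PySem.Chars.splitOn (c :: t) ['$'] = List.modifyHead (c :: ·) (PySem.Chars.splitOn t ['$']) := by
  have hpre : (['$'].isPrefixOf (c :: t)) = false := by
    simp [List.isPrefixOf]; exact fun h => absurd h.symm hc
  rw [PySem.Chars.splitOn, PySem.Chars.splitOn, PySem.Chars.splitOn.go]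
  simp only [List.length_cons, hpre, Bool.false_eq_true, if_neg, not_false_iff]
  rw [pvGo_cur]
  simp

theorem pvSplitOn_cons_dollar (t : List Char) :
    PySem.Chars.splitOn ('$' :: t) ['$'] = [] :: PySem.Chars.splitOn t ['$'] := by
  rw [PySem.Chars.splitOn, PySem.Chars.splitOn, PySem.Chars.splitOn.go]
  have hpre : (['$'].isPrefixOf ('$' :: t)) = true := by simp [List.isPrefixOf]
  simp only [List.length_cons, hpre, if_pos, List.reverse_nil]
  rw [pvGo_acc]
  simp

theorem pvSplitOn_no_sep (cs : List Char) (h : '$' ∉ cs) :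
    PySem.Chars.splitOn cs ['$'] = [cs] := by
  induction cs with
  | nil => rfl
  | cons c t ih =>
    rw [pvSplitOn_cons_ne c t (fun he => h (he ▸ List.mem_cons_self)), ih (fun ht => h (List.mem_cons_of_mem _ ht))]
    rfl

theorem pvSplitOn_sep_free (p : List Char) : ∀ (t : List Char), '$' ∉ p →
    PySem.Chars.splitOn (p ++ '$' :: t) ['$'] = p :: PySem.Chars.splitOn t ['$'] := by
  induction p with
  | nil => intro t _; exact pvSplitOn_cons_dollar t
  | cons c p' ih =>
    intro t hp
    rw [List.cons_append, pvSplitOn_cons_ne c _ (fun he => hp (he ▸ List.mem_cons_self)),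
      ih t (fun hm => hp (List.mem_cons_of_mem _ hm))]
    rfl

theorem pvDecompose (t : List Char) (h : '$' ∈ t) :
    ∃ body r, t = body ++ '$' :: r ∧ '$' ∉ body := by
  induction t with
  | nil => simp at h
  | cons c rest ih =>
    by_cases hc : c = '$'
    · exact ⟨[], rest, by simp [hc], by simp⟩
    · obtain ⟨b, r, rfl, hb⟩ := ih ((List.mem_cons.mp h).resolve_left (fun he => hc he.symm))
      exact ⟨c :: b, r, rfl, by simp [hb]; exact fun he => hc he.symm⟩

theorem pvBridge (tokens : List (String × String)) : ∀ (n : Nat) (cs : List Char),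
    cs.length ≤ n → cs.count '$' % 2 = 0 →
    pvWalk tokens false (PySem.Chars.splitOn cs ['$']) = pvFlatA tokens cs := by
  intro n
  induction n with
  | zero =>
    intro cs hl _
    rw [List.eq_nil_of_length_eq_zero (Nat.le_zero.mp hl)]
    rw [pvSplitOn_no_sep [] (by simp)]
    simp [pvWalk, pvFlatA]
  | succ n ih =>
    intro cs hl h
    by_cases hmem : '$' ∈ cs
    · obtain ⟨p, t, rfl, hp⟩ := pvDecompose cs hmem
      have hcp : p.count '$' = 0 := List.count_eq_zero.mpr hp
      have hct : t.count '$' % 2 = 1 := by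
        simp [List.count_append, List.count_cons, hcp] at h
        omega
      have hmt : '$' ∈ t := by
        by_contra hmt
        rw [List.count_eq_zero.mpr hmt] at hct
        omega
      obtain ⟨body, r, rfl, hb⟩ := pvDecompose t hmt
      have hcb : body.count '$' = 0 := List.count_eq_zero.mpr hb
      have hcr : r.count '$' % 2 = 0 := by
        simp [List.count_append, List.count_cons, hcb] at hct
        omega
      rw [pvSplitOn_sep_free p _ hp, pvSplitOn_sep_free body _ hb]
      rw [pvWalk, pvWalk]
      simp only [Bool.not_false, Bool.not_true, if_pos, if_neg, Bool.false_eq_true, not_false_iff, reduceIte]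
      rw [ih r (by simp at hl; omega) hcr]
      rw [pvFlatA_append tokens p _ hp, pvFlatA_dollar tokens body r hb]
    · rw [pvSplitOn_no_sep cs hmem, pvFlatA_no_sep tokens cs hmem]
      simp [pvWalk]

theorem pvFindDollar_eq (cs : List Char) (j : Nat) :
    pvFindDollar cs j = (PySem.List.index? (cs.drop j) '$').map (fun k => j + k) := by
  fun_induction pvFindDollar cs j with
  | case1 j h hc =>
    rw [List.drop_eq_getElem_cons h, hc, PySem.List.index?_cons_self]
    simp
  | case2 j h hc ih =>
    rw [List.drop_eq_getElem_cons h, ih, PySem.List.index?_cons_of_ne _ hc]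
    cases PySem.List.index? (cs.drop (j+1)) '$' <;> simp <;> omega
  | case3 j h =>
    rw [List.drop_eq_nil_of_le (by omega)]
    simp [PySem.List.index?, List.idxOf?]

theorem pvTokenLoop_eq (tokens : List (String × String)) (cs : List Char) :
    ∀ (fuel i : Nat) (res : List String), i ≤ cs.length → cs.length - i < fuel →
    ((pvTokenLoop tokens cs fuel i (i + 1) res).map String.toList).flatten
      = ((res.map String.toList).flatten) ++ pvFlatA tokens (cs.drop i) := by
  intro fuel
  induction fuel with
  | zero => intro i res hi hf; omega
  | succ fuel ih =>
    intro i res hi hf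
    by_cases h : i < cs.length
    · rw [pvTokenLoop, dif_pos h]
      by_cases hd : cs[i] = '$'
      · rw [if_pos hd, pvFindDollar_eq cs (i + 1)]
        rw [List.drop_eq_getElem_cons h, hd]
        cases hk : PySem.List.index? (cs.drop (i + 1)) '$' with
        | none =>
          rw [pvFlatA, if_pos rfl, hk]
          simp
        | some k =>
          have ⟨hklt, hke, _⟩ := PySem.List.getElem_of_index?_eq_some hk
          have hklen : k < cs.length - (i + 1) := by simpa using hklt
          simp only [Option.map_some]
          have hcast : ((i + 1 + k : Nat) : Int) + 1 = ((i + k + 2 : Nat) : Int) := by push_cast; ring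
          rw [hcast, PySem.List.slice_natCast]
          have hsl : (cs.drop i).take (i + k + 2 - i) = '$' :: (cs.drop (i + 1)).take (k + 1) := by
            rw [List.drop_eq_getElem_cons h, hd]
            have : i + k + 2 - i = (k + 1) + 1 := by omega
            rw [this, List.take_succ_cons]
          rw [hsl]
          have harg : i + 1 + k + 1 = i + k + 2 := by omega
          have harg2 : i + 1 + k + 2 = (i + k + 2) + 1 := by omega
          rw [harg, harg2]
          have hle : i + k + 2 ≤ cs.length := by omega
          have hfe : cs.length - (i + k + 2) < fuel := by omega
          have := ih (i + k + 2) (match PySem.Dict.get? (PySem.Dict.mk tokens)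
              (String.ofList ('$' :: (cs.drop (i+1)).take (k+1))) with
            | some v => res ++ [v]
            | none => res) hle hfe
          rw [this]
          rw [pvFlatA, if_pos rfl, hk]
          have hdd : cs.drop (i + k + 2) = (cs.drop (i + 1)).drop (k + 1) := by
            rw [List.drop_drop]; congr 1; omega
          rw [hdd]
          unfold pvTokChars
          rcases hg : PySem.Dict.get? (PySem.Dict.mk tokens)
              (String.ofList ('$' :: (cs.drop (i+1)).take (k+1))) with _ | v <;> simp [hg]
      · rw [if_neg hd]
        have := ih (i + 1) (res ++ [String.ofList [cs[i]]]) (by omega) (by omega)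
        rw [show i + 1 + 1 = (i + 1) + 1 from rfl] at this
        rw [this]
        rw [List.drop_eq_getElem_cons h, pvFlatA, if_neg hd]
        simp
    · rw [pvTokenLoop, dif_neg h]
      rw [List.drop_eq_nil_of_le (by omega), pvFlatA]
      simp

theorem pvKey_eq (part : String) :
    ("$" ++ part ++ "$") = String.ofList ('$' :: part.toList ++ ['$']) := by
  apply String.ext
  simp

theorem pvFoldl_eq (tokens : List (String × String)) :
    ∀ (parts : List String) (acc : List String) (b : Bool),
    (((parts.foldl
        (fun (acc : List String × Bool) (part : String) =>
          (acc.1 ++ [if acc.2 then PySem.Dict.getD (PySem.Dict.mk tokens) ("$" ++ part ++ "$") "" else part],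
           !acc.2))
        (acc, b)).1).map String.toList).flatten
      = (acc.map String.toList).flatten ++ pvWalk tokens b (parts.map String.toList) := by
  intro parts
  induction parts with
  | nil => intro acc b; simp [pvWalk]
  | cons part ps ih =>
    intro acc b
    rw [List.foldl_cons, List.map_cons, pvWalk, ih]
    have hx : (if b then PySem.Dict.getD (PySem.Dict.mk tokens) ("$" ++ part ++ "$") "" else part).toList
        = (if b then pvTokChars tokens ('$' :: part.toList ++ ['$']) else part.toList) := by
      cases b
      · simp
      · simp only [if_pos]
        rw [pvKey_eq, PySem.Dict.getD, pvTokChars]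
        cases PySem.Dict.get? (PySem.Dict.mk tokens) (String.ofList ('$' :: part.toList ++ ['$'])) <;> simp
    simp [hx]

theorem pvJoin_flatten (parts : List (List Char)) :
    PySem.Chars.join [] parts = parts.flatten := by
  simp only [PySem.Chars.join, List.intercalate]
  induction parts with
  | nil => simp
  | cons p ps ih => cases ps <;> simp_all [List.intersperse]

-- ===== VERDICT (by name: the statement is the Claim_ definition above) =====
theorem token_replace_spec : Claim_equal_token_replace := by
  intro s tokens _ hpre
  unfold Pre_token_replace at hpre
  unfold Spec_token_replace token_replace token_replace_alt
  rw [PySem.Str.join, PySem.Str.join]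
  congr 1
  rw [show ("" : String).toList = [] from rfl, pvJoin_flatten, pvJoin_flatten]
  have hA := pvTokenLoop_eq tokens s.toList (s.toList.length + 1) 0 [] (by omega) (by omega)
  simp only [List.drop_zero, List.map_nil, List.flatten_nil, List.nil_append] at hA
  rw [show (1 : Nat) = 0 + 1 from rfl, hA]
  simp only [PySem.Str.split?, PySem.Chars.split?, show ("$" : String).toList = ['$'] from rfl,
    List.isEmpty_cons, Bool.false_eq_true, if_neg, not_false_iff, Option.map_some, Option.getD_some]
  rw [pvFoldl_eq tokens ((PySem.Chars.splitOn s.toList ['$']).map String.ofList) [] false]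
  simp only [List.map_nil, List.flatten_nil, List.nil_append, List.map_map]
  rw [show (String.toList ∘ String.ofList) = id from funext (fun l => by simp), List.map_id]
  exact (pvBridge tokens s.toList.length s.toList le_rfl hpre).symm
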